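-- pv_equiv track=rewrite | github.com/ranchimall/Intern_projects | Divyansh_Bhardwaj/flo_function.py | flo_sorting
-- ===== SOURCE A (Python) =====
-- def flo_sorting(list):
--     length = len(list)
--     i = 0
--     a = 0
--     b = 0
--     c = 0
--     d = 0
--     e = 0
--
--     list2 = []
--     newlist = []
--
--     while i != length:
--         if list[i][-1] == ':':
--             e = list[i]
--             list2 = list[i+1:]
--             list2 = flo_sorting(list2)
--             break
--         elif list[i][-1] == '#':
--             a = list[i]
--         elif list[i][-1] == '*':
--             b = list[i]
--         elif list[i][-1] == '$':
--             c = list[i]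
--         elif list[i][-1] == '@':
--             d = list[i]
--         else:
--             break
--         i = i+1
--     if d != 0:
--         newlist.append(d)
--     if b != 0:
--         newlist.append(b)
--     if a != 0:
--         newlist.append(a)
--     if c != 0:
--         newlist.append(c)
--     if e != 0:
--         newlist.append(e)
--     if list2 == []:
--         return newlist
--     else:
--         newlist = newlist+list2
--         return newlist
-- ===== SOURCE B (Python) =====
-- def flo_sorting(list):
--     # One linear pass: keep the last-seen item per tag for the current segment,
--     # flush winners in the fixed order @ * # $ at each ':' item (and at the end),
--     # stop at the first untagged item.
--     out = []
--     win = {}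
--     for s in list:
--         t = s[-1]
--         if t == ':':
--             for tag in '@*#$':
--                 if tag in win:
--                     out.append(win[tag])
--             out.append(s)
--             win = {}
--         elif t in '@*#$':
--             win[t] = s
--         else:
--             break
--     for tag in '@*#$':
--         if tag in win:
--             out.append(win[tag])
--     return out
-- ===== Notes on version B (the rewrite author's own statement) =====
-- stated objective: alternative
-- what changed: Replaced A's per-segment recursion with list slicing and five sentinel variables by a single linear pass that keeps the current segment's per-tag winners in a dict and flushes them in the fixed order @ * # $ at each ':' delimiter and at the end.
import Mathlib
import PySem

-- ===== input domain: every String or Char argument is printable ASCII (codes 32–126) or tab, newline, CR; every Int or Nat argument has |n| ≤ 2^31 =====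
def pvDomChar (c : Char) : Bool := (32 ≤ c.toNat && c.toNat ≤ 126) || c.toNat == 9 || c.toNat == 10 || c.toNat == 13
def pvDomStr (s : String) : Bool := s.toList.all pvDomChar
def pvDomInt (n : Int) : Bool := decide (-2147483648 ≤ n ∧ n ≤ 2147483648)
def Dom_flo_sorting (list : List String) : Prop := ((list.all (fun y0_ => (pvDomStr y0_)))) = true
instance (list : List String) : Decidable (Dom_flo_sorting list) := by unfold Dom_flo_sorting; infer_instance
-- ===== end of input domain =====

-- B replaces A's recursive re-scan with slicing by one linear pass that keeps per-segment
-- winners in a dict and flushes them in fixed order at each ':' item (objective: alternative single-pass decomposition).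

-- ===== PORT A =====
-- the four if-appends building `newlist` (d, b, a, c, then e); `0` sentinels are `none`
def floA_newlist (a b c d e : Option String) : List String :=
  let nl : List String := []
  let nl := match d with | some x => nl ++ [x] | none => nl
  let nl := match b with | some x => nl ++ [x] | none => nl
  let nl := match a with | some x => nl ++ [x] | none => nl
  let nl := match c with | some x => nl ++ [x] | none => nl
  match e with | some x => nl ++ [x] | none => nl

-- A's while loop over i, state a b c d; `list[i+1:]` is the tail at the current position
def floA_go : List String → Option String → Option String → Option String → Option String → List String
  | [], a, b, c, d => floA_newlist a b c d none            -- i == length: e = 0, list2 == []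
  | s :: rest, a, b, c, d =>
    match PySem.Str.pyGet? s (-1) with
    | none => []                                           -- list[i][-1] raises IndexError (outside Pre_)
    | some ch =>
      if ch = ':' then
        let list2 := floA_go rest none none none none      -- flo_sorting(list[i+1:])
        let nl := floA_newlist a b c d (some s)
        if list2 = [] then nl else nl ++ list2
      else if ch = '#' then floA_go rest (some s) b c d
      else if ch = '*' then floA_go rest a (some s) c d
      else if ch = '$' then floA_go rest a b (some s) d
      else if ch = '@' then floA_go rest a b c (some s)
      else floA_newlist a b c d none                       -- else: break (list2 == [])

def flo_sorting (list : List String) : List String :=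
  floA_go list none none none none

-- ===== PORT B =====
-- `for tag in '@*#$': if tag in win: out.append(win[tag])`
def floB_flush (out : List String) (win : PySem.Dict Char String) : List String :=
  (['@', '*', '#', '$'] : List Char).foldl
    (fun o tag => match win.get? tag with | some v => o ++ [v] | none => o) out

def floB_go : List String → List String → PySem.Dict Char String → List String
  | [], out, win => floB_flush out win
  | s :: rest, out, win =>
    match PySem.Str.pyGet? s (-1) with
    | none => floB_flush out win                           -- s[-1] raises IndexError (outside Pre_)
    | some t =>
      if t = ':' then floB_go rest (floB_flush out win ++ [s]) PySem.Dict.empty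
      else if t = '@' ∨ t = '*' ∨ t = '#' ∨ t = '$' then floB_go rest out (win.insert t s)
      else floB_flush out win                              -- break

def flo_sorting_alt (list : List String) : List String :=
  floB_go list [] PySem.Dict.empty

-- ===== PRECONDITION & SPEC =====
-- an element the scan keeps going past: nonempty and ending in one of the five tag characters
def floIsTagged (s : String) : Bool :=
  match PySem.Str.pyGet? s (-1) with
  | some c => (c == ':') || (c == '#') || (c == '*') || (c == '$') || (c == '@')
  | none => false

-- Pre_ excludes exactly the inputs on which A raises IndexError: an empty string reached by the
-- scan, i.e. one with no nonempty untagged element (where the scan breaks) anywhere before it.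
def Pre_flo_sorting (list : List String) : Prop :=
  ∀ i < list.length, list[i]? = some "" →
    ∃ j < i, (list[j]?.getD "") ≠ "" ∧ floIsTagged (list[j]?.getD "") = false
instance (list : List String) : Decidable (Pre_flo_sorting list) := by unfold Pre_flo_sorting; infer_instance

def pvWitness_flo_sorting : List String := ["b@", "a#", "x:", "c$", "c2$", "z"]

def Spec_flo_sorting (list : List String) (out : List String) : Prop := out = flo_sorting_alt list
instance (list : List String) (out : List String) : Decidable (Spec_flo_sorting list out) := by unfold Spec_flo_sorting; infer_instance

-- ===== CLAIM (what is proved, stated in full; the proofs are below) =====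
def Claim_equal_flo_sorting : Prop := ∀ (list : List String), Dom_flo_sorting list → Pre_flo_sorting list → Spec_flo_sorting list (flo_sorting list)

-- ===== LEMMAS AND PROOFS =====

-- B's flush equals A's newlist (with no e) appended to the accumulated output,
-- whenever the dict's four tag entries match A's four registers.
theorem floB_flush_eq (out : List String) (win : PySem.Dict Char String)
    (a b c d : Option String)
    (ha : win.get? '#' = a) (hb : win.get? '*' = b)
    (hc : win.get? '$' = c) (hd : win.get? '@' = d) :
    floB_flush out win = out ++ floA_newlist a b c d none := by
  simp only [floB_flush, List.foldl, ha, hb, hc, hd, floA_newlist]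
  cases a <;> cases b <;> cases c <;> cases d <;> simp

theorem floA_newlist_some_e (a b c d : Option String) (s : String) :
    floA_newlist a b c d (some s) = floA_newlist a b c d none ++ [s] := by
  simp only [floA_newlist]

theorem pyGet_neg_one_isSome (s : String) (h : s ≠ "") :
    (PySem.Str.pyGet? s (-1)).isSome := by
  have h' : s.toList ≠ [] := fun hl => h (String.toList_eq_nil_iff.mp hl)
  simp only [PySem.Str.pyGet?_eq, PySem.Chars.pyGet?_eq_listPyGet?]
  cases hx : s.toList with
  | nil => exact absurd hx h'
  | cons x xs => simp [PySem.List.pyGet?, PySem.List.pyIdx?]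

theorem pre_head_ne (s : String) (rest : List String)
    (h : Pre_flo_sorting (s :: rest)) : s ≠ "" := by
  intro he
  obtain ⟨j, hj, -⟩ := h 0 (by simp) (by simp [he])
  omega

theorem pre_tail (s : String) (rest : List String)
    (h : Pre_flo_sorting (s :: rest)) (ht : floIsTagged s = true) :
    Pre_flo_sorting rest := by
  intro i hi hie
  obtain ⟨j, hj, hne, hjt⟩ := h (i + 1) (by simp; omega) (by simpa using hie)
  cases j with
  | zero => simp only [List.getElem?_cons_zero, Option.getD_some] at hjt; simp [hjt] at ht
  | succ j' => exact ⟨j', by omega, by simpa using hne, by simpa using hjt⟩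

theorem floB_go_eq (l : List String) :
    ∀ (out : List String) (a b c d : Option String) (win : PySem.Dict Char String),
    Pre_flo_sorting l →
    win.get? '#' = a → win.get? '*' = b → win.get? '$' = c → win.get? '@' = d →
    floB_go l out win = out ++ floA_go l a b c d := by
  induction l with
  | nil =>
    intro out a b c d win _ ha hb hc hd
    simp only [floB_go, floA_go]
    exact floB_flush_eq out win a b c d ha hb hc hd
  | cons s rest ih =>
    intro out a b c d win hpre ha hb hc hd
    have hs : s ≠ "" := pre_head_ne s rest hpre
    obtain ⟨ch, hch⟩ := Option.isSome_iff_exists.mp (pyGet_neg_one_isSome s hs)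
    simp only [floB_go, floA_go, hch]
    by_cases h1 : ch = ':'
    · simp only [h1, reduceIte]
      have hrest := pre_tail s rest hpre (by simp [floIsTagged, show PySem.List.pyGet? s.toList (-1) = some ch from by simpa using hch, h1])
      rw [ih _ none none none none PySem.Dict.empty hrest (by simp) (by simp) (by simp) (by simp)]
      rw [floB_flush_eq out win a b c d ha hb hc hd, floA_newlist_some_e]
      cases hl2 : floA_go rest none none none none with
      | nil => simp
      | cons y ys => simp
    · by_cases h2 : ch = '#'
      · simp only [h2, reduceIte]
        exact ih out (some s) b c d _ (pre_tail s rest hpre (by simp [floIsTagged, show PySem.List.pyGet? s.toList (-1) = some ch from by simpa using hch, h2]))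
          (by simp) (by simp [PySem.Dict.get?_insert, hb])
          (by simp [PySem.Dict.get?_insert, hc]) (by simp [PySem.Dict.get?_insert, hd])
      · by_cases h3 : ch = '*'
        · simp only [h3, reduceIte]
          exact ih out a (some s) c d _ (pre_tail s rest hpre (by simp [floIsTagged, show PySem.List.pyGet? s.toList (-1) = some ch from by simpa using hch, h3]))
            (by simp [PySem.Dict.get?_insert, ha]) (by simp)
            (by simp [PySem.Dict.get?_insert, hc]) (by simp [PySem.Dict.get?_insert, hd])
        · by_cases h4 : ch = '$'
          · simp only [h4, reduceIte]
            exact ih out a b (some s) d _ (pre_tail s rest hpre (by simp [floIsTagged, show PySem.List.pyGet? s.toList (-1) = some ch from by simpa using hch, h4]))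
              (by simp [PySem.Dict.get?_insert, ha]) (by simp [PySem.Dict.get?_insert, hb])
              (by simp) (by simp [PySem.Dict.get?_insert, hd])
          · by_cases h5 : ch = '@'
            · simp only [h5, reduceIte]
              exact ih out a b c (some s) _ (pre_tail s rest hpre (by simp [floIsTagged, show PySem.List.pyGet? s.toList (-1) = some ch from by simpa using hch, h5]))
                (by simp [PySem.Dict.get?_insert, ha]) (by simp [PySem.Dict.get?_insert, hb])
                (by simp [PySem.Dict.get?_insert, hc]) (by simp)
            · simp only [h1, h2, h3, h4, h5, reduceIte, or_self]
              exact floB_flush_eq out win a b c d ha hb hc hd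

-- ===== VERDICT (by name: the statement is the Claim_ definition above) =====
theorem flo_sorting_spec : Claim_equal_flo_sorting := by
  intro list _ hpre
  unfold Spec_flo_sorting flo_sorting flo_sorting_alt
  rw [floB_go_eq list [] none none none none PySem.Dict.empty hpre
    (by simp) (by simp) (by simp) (by simp)]
  simp
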